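-- pv_equiv track=rewrite | github.com/davistroy/bookmark-validator | bookmark_processor/utils/data_recovery.py | create_error_report
-- ===== SOURCE A (Python) =====
-- from typing import Any, Callable, Dict, List, Optional, Tuple, Union
--
-- def create_error_report(
--     issues: List[str], record: Dict[str, Any], row_number: Optional[int] = None
-- ) -> str:
--     """
--     Create a detailed error report for a problematic record
--
--     Args:
--         issues: List of issue descriptions
--         record: The problematic record
--         row_number: Optional row number in CSV
--
--     Returns:
--         Formatted error report string
--     """
--     report_parts = []
--
--     if row_number:
--         report_parts.append(f"Row {row_number}:")
--
--     # Add URL for identification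
--     url = record.get("url", "N/A")
--     report_parts.append(f"  URL: {url}")
--
--     # Add title if available
--     title = record.get("title", "")
--     if title:
--         report_parts.append(
--             f"  Title: {title[:100]}{'...' if len(title) > 100 else ''}"
--         )
--
--     # Add issues
--     report_parts.append("  Issues:")
--     for issue in issues:
--         report_parts.append(f"    - {issue}")
--
--     # Add suggestions
--     suggestions = generate_fix_suggestions(issues, record)
--     if suggestions:
--         report_parts.append("  Suggestions:")
--         for suggestion in suggestions:
--             report_parts.append(f"    - {suggestion}")
--
--     return "\n".join(report_parts)
--
-- def generate_fix_suggestions(issues: List[str], record: Dict[str, Any]) -> List[str]: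
--     """
--     Generate suggestions for fixing data issues
--
--     Args:
--         issues: List of detected issues
--         record: The problematic record
--
--     Returns:
--         List of fix suggestions
--     """
--     suggestions = []
--
--     for issue in issues:
--         issue_lower = issue.lower()
--
--         if "missing" in issue_lower and "url" in issue_lower:
--             suggestions.append("Add a valid URL for this bookmark")
--
--         elif "url" in issue_lower and "title" in issue_lower:
--             suggestions.append("Check if URL and title fields are swapped")
--
--         elif "encoding" in issue_lower:
--             suggestions.append("Re-save the CSV file with UTF-8 encoding")
--
--         elif "truncated" in issue_lower:
--             suggestions.append("Check source data for complete content")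
--
--         elif "html" in issue_lower:
--             suggestions.append("Remove HTML tags from text fields")
--
--         elif "tags" in issue_lower:
--             suggestions.append("Format tags as comma-separated values")
--
--         elif "date" in issue_lower:
--             suggestions.append("Use ISO format (YYYY-MM-DDTHH:MM:SSZ) for dates")
--
--     # Generic suggestions
--     if not suggestions:
--         suggestions.append("Verify data integrity and format consistency")
--
--     return suggestions
-- ===== SOURCE B (Python) =====
-- _RULES = [
--     (("missing", "url"), "Add a valid URL for this bookmark"),
--     (("url", "title"), "Check if URL and title fields are swapped"),
--     (("encoding",), "Re-save the CSV file with UTF-8 encoding"),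
--     (("truncated",), "Check source data for complete content"),
--     (("html",), "Remove HTML tags from text fields"),
--     (("tags",), "Format tags as comma-separated values"),
--     (("date",), "Use ISO format (YYYY-MM-DDTHH:MM:SSZ) for dates"),
-- ]
--
--
-- def _suggest(low, rules=_RULES):
--     """First-match rule lookup, recursive over the rule table."""
--     if not rules:
--         return None
--     keys, text = rules[0]
--     if all(k in low for k in keys):
--         return text
--     return _suggest(low, rules[1:])
--
--
-- def create_error_report(issues, record, row_number=None):
--     # One fused pass over issues: build the issue lines and the suggestion
--     # lines text at the same time, by direct string concatenation.
--     issue_text = ""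
--     sugg_text = ""
--     for issue in issues:
--         issue_text += "\n    - " + issue
--         s = _suggest(issue.lower())
--         if s is not None:
--             sugg_text += "\n    - " + s
--     if not sugg_text:
--         sugg_text = "\n    - Verify data integrity and format consistency"
--     report = ""
--     if row_number:
--         report += f"Row {row_number}:\n"
--     report += f"  URL: {record.get('url', 'N/A')}"
--     title = record.get("title", "")
--     if title:
--         report += "\n  Title: " + title[:100] + ("..." if len(title) > 100 else "")
--     return report + "\n  Issues:" + issue_text + "\n  Suggestions:" + sugg_text
-- ===== Notes on version B (the rewrite author's own statement) =====
-- stated objective: alternative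
-- what changed: B makes one fused pass over issues that builds the issue-lines text and the suggestion-lines text simultaneously by direct string concatenation (no intermediate line list, no join), with the if/elif chain replaced by a recursive first-match scan of a rule table.
import Mathlib
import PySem

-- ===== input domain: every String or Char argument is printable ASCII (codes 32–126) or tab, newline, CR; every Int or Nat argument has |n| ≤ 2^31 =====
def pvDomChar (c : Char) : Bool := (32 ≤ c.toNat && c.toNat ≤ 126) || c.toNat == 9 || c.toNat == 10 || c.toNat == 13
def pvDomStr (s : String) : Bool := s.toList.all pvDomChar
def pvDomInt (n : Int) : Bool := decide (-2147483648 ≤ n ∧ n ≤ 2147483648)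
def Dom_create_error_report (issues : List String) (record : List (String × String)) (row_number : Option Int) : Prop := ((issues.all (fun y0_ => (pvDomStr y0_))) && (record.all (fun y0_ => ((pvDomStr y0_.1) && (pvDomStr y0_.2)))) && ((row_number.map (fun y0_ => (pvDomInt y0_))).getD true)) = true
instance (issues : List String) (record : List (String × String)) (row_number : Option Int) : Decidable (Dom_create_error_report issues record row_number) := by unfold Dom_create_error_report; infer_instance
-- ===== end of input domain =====

-- B replaces A's line-list-then-join construction by direct string concatenation built in ONE
-- fused pass over issues (issue lines and suggestion lines together), the if/elif chain by a
-- recursive first-match scan of a rule table (objective: alternative).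

-- ===== PORT A =====
def generate_fix_suggestions (issues : List String) (record : List (String × String)) : List String :=
  let _ := record
  let suggestions := issues.foldl (fun acc issue =>
    let il := PySem.Str.lower issue
    if PySem.Str.isIn "missing" il && PySem.Str.isIn "url" il then
      acc ++ ["Add a valid URL for this bookmark"]
    else if PySem.Str.isIn "url" il && PySem.Str.isIn "title" il then
      acc ++ ["Check if URL and title fields are swapped"]
    else if PySem.Str.isIn "encoding" il then
      acc ++ ["Re-save the CSV file with UTF-8 encoding"]
    else if PySem.Str.isIn "truncated" il then
      acc ++ ["Check source data for complete content"]
    else if PySem.Str.isIn "html" il then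
      acc ++ ["Remove HTML tags from text fields"]
    else if PySem.Str.isIn "tags" il then
      acc ++ ["Format tags as comma-separated values"]
    else if PySem.Str.isIn "date" il then
      acc ++ ["Use ISO format (YYYY-MM-DDTHH:MM:SSZ) for dates"]
    else acc) []
  if suggestions.isEmpty then ["Verify data integrity and format consistency"] else suggestions

def create_error_report (issues : List String) (record : List (String × String)) (row_number : Option Int) : String :=
  let p0 : List String := []
  let p1 := match row_number with
    | none => p0
    | some n => if n == 0 then p0 else p0 ++ ["Row " ++ PySem.Int.toStr n ++ ":"]
  let url := (PySem.Dict.mk record).getD "url" "N/A"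
  let p2 := p1 ++ ["  URL: " ++ url]
  let title := (PySem.Dict.mk record).getD "title" ""
  let p3 := if title == "" then p2 else
    p2 ++ ["  Title: " ++ PySem.Str.slice title none (some 100) ++
           (if 100 < PySem.Str.len title then "..." else "")]
  let p4 := p3 ++ ["  Issues:"]
  let p5 := issues.foldl (fun acc issue => acc ++ ["    - " ++ issue]) p4
  let suggestions := generate_fix_suggestions issues record
  let p6 := if suggestions.isEmpty then p5 else
    suggestions.foldl (fun acc s => acc ++ ["    - " ++ s]) (p5 ++ ["  Suggestions:"])
  PySem.Str.join "\n" p6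

-- ===== PORT B =====
def pvRules : List (List String × String) :=
  [(["missing", "url"], "Add a valid URL for this bookmark"),
   (["url", "title"], "Check if URL and title fields are swapped"),
   (["encoding"], "Re-save the CSV file with UTF-8 encoding"),
   (["truncated"], "Check source data for complete content"),
   (["html"], "Remove HTML tags from text fields"),
   (["tags"], "Format tags as comma-separated values"),
   (["date"], "Use ISO format (YYYY-MM-DDTHH:MM:SSZ) for dates")]

-- recursive first-match scan of the rule table (Source B's _suggest)
def pvSuggest (low : String) : List (List String × String) → Option String
  | [] => none
  | (keys, text) :: rest =>
      if keys.all (fun k => PySem.Str.isIn k low) then some text else pvSuggest low rest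

def create_error_report_alt (issues : List String) (record : List (String × String)) (row_number : Option Int) : String :=
  -- one fused pass: (issue_text, sugg_text) accumulated together
  let st := issues.foldl (fun (st : String × String) issue =>
      let it := st.1 ++ "\n    - " ++ issue
      match pvSuggest (PySem.Str.lower issue) pvRules with
      | some s => (it, st.2 ++ "\n    - " ++ s)
      | none => (it, st.2)) ("", "")
  let sugg_text := if st.2 == "" then "\n    - Verify data integrity and format consistency" else st.2
  let report := match row_number with
    | none => ""
    | some n => if n == 0 then "" else "Row " ++ PySem.Int.toStr n ++ ":\n"
  let report := report ++ "  URL: " ++ (PySem.Dict.mk record).getD "url" "N/A"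
  let title := (PySem.Dict.mk record).getD "title" ""
  let report := if title == "" then report else
    report ++ "\n  Title: " ++ PySem.Str.slice title none (some 100) ++
      (if 100 < PySem.Str.len title then "..." else "")
  report ++ "\n  Issues:" ++ st.1 ++ "\n  Suggestions:" ++ sugg_text

-- ===== PRECONDITION & SPEC =====
def Spec_create_error_report (issues : List String) (record : List (String × String)) (row_number : Option Int) (out : String) : Prop := out = create_error_report_alt issues record row_number
instance (issues : List String) (record : List (String × String)) (row_number : Option Int) (out : String) : Decidable (Spec_create_error_report issues record row_number out) := by unfold Spec_create_error_report; infer_instance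

-- ===== CLAIM (what is proved, stated in full; the proofs are below) =====
def Claim_equal_create_error_report : Prop := ∀ (issues : List String) (record : List (String × String)) (row_number : Option Int), Dom_create_error_report issues record row_number → Spec_create_error_report issues record row_number (create_error_report issues record row_number)

-- ===== LEMMAS AND PROOFS =====

-- "glue": what "\n".join contributes after the first line
def pvGl (xs : List String) : String := xs.foldl (fun a y => a ++ "\n" ++ y) ""

theorem pvGl_from (xs : List String) (a : String) :
    xs.foldl (fun a y => a ++ "\n" ++ y) a = a ++ pvGl xs := by
  induction xs generalizing a with
  | nil => simp [pvGl]
  | cons h t ih =>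
    rw [List.foldl_cons, ih]
    have hrhs : pvGl (h :: t) = ("" ++ "\n" ++ h) ++ pvGl t := by
      rw [pvGl, List.foldl_cons, ih]
    rw [hrhs]
    simp [String.append_assoc]

theorem pvGl_append (xs ys : List String) : pvGl (xs ++ ys) = pvGl xs ++ pvGl ys := by
  rw [pvGl, List.foldl_append, ← pvGl, pvGl_from]

theorem join_cons_cons (x h : String) (t : List String) :
    PySem.Str.join "\n" (x :: h :: t) = x ++ "\n" ++ PySem.Str.join "\n" (h :: t) := by
  simp [PySem.Str.join, PySem.Chars.join, List.intercalate, String.append_assoc]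
  rw [show ('\n' :: (List.intersperse ['\n'] (h.toList :: List.map String.toList t)).flatten)
      = ['\n'] ++ (List.intersperse ['\n'] (h.toList :: List.map String.toList t)).flatten from rfl,
    String.ofList_append]

theorem join_eq_gl (x : String) (xs : List String) :
    PySem.Str.join "\n" (x :: xs) = x ++ pvGl xs := by
  induction xs generalizing x with
  | nil =>
    simp [PySem.Str.join, PySem.Chars.join, List.intercalate, pvGl]
  | cons h t ih =>
    rw [join_cons_cons, ih]
    have hrhs : pvGl (h :: t) = ("" ++ "\n" ++ h) ++ pvGl t := by
      rw [pvGl, List.foldl_cons, pvGl_from]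
    rw [hrhs]
    simp [String.append_assoc]

-- B's per-section accumulator ("\n    - " per element)
def pvSec (xs : List String) : String := xs.foldl (fun a x => a ++ "\n    - " ++ x) ""

theorem pvSec_from (xs : List String) (a : String) :
    xs.foldl (fun a x => a ++ "\n    - " ++ x) a = a ++ pvSec xs := by
  induction xs generalizing a with
  | nil => simp [pvSec]
  | cons h t ih =>
    rw [List.foldl_cons, ih]
    have hrhs : pvSec (h :: t) = ("" ++ "\n    - " ++ h) ++ pvSec t := by
      rw [pvSec, List.foldl_cons, ih]
    rw [hrhs]
    simp [String.append_assoc]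

theorem pvSec_cons (x : String) (xs : List String) :
    pvSec (x :: xs) = "\n    - " ++ x ++ pvSec xs := by
  rw [pvSec, List.foldl_cons, pvSec_from]
  simp

theorem pvGl_cons (x : String) (xs : List String) :
    pvGl (x :: xs) = "\n" ++ x ++ pvGl xs := by
  rw [pvGl, List.foldl_cons, pvGl_from]
  simp

theorem pvSec_eq_gl (xs : List String) : pvSec xs = pvGl (xs.map (fun x => "    - " ++ x)) := by
  induction xs with
  | nil => rfl
  | cons h t ih =>
    rw [pvSec_cons, List.map_cons, pvGl_cons, ih]
    rw [← String.toList_inj]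
    simp [String.toList_append]

theorem pvSec_ne_empty (x : String) (xs : List String) : pvSec (x :: xs) ≠ "" := by
  intro hc
  have hl := congrArg (fun s => s.toList.length) ((pvSec_cons x xs).symm.trans hc)
  simp at hl

def pvMr (issue : String) : Option String := pvSuggest (PySem.Str.lower issue) pvRules

-- A's one-issue chain step appends exactly B's first-matching-rule suggestion.
theorem step_eq_pvMr (acc : List String) (issue : String) :
    (let il := PySem.Str.lower issue
     if PySem.Str.isIn "missing" il && PySem.Str.isIn "url" il then
       acc ++ ["Add a valid URL for this bookmark"]
     else if PySem.Str.isIn "url" il && PySem.Str.isIn "title" il then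
       acc ++ ["Check if URL and title fields are swapped"]
     else if PySem.Str.isIn "encoding" il then
       acc ++ ["Re-save the CSV file with UTF-8 encoding"]
     else if PySem.Str.isIn "truncated" il then
       acc ++ ["Check source data for complete content"]
     else if PySem.Str.isIn "html" il then
       acc ++ ["Remove HTML tags from text fields"]
     else if PySem.Str.isIn "tags" il then
       acc ++ ["Format tags as comma-separated values"]
     else if PySem.Str.isIn "date" il then
       acc ++ ["Use ISO format (YYYY-MM-DDTHH:MM:SSZ) for dates"]
     else acc) = acc ++ (pvMr issue).toList := by
  simp only [pvMr, pvSuggest, pvRules, List.all_cons, List.all_nil, Bool.and_true]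
  split_ifs <;> simp_all

-- A's accumulation over issues lists exactly the matched suggestions in order.
theorem foldl_chain_eq_filterMap (issues : List String) (acc : List String) :
    issues.foldl (fun acc issue =>
      let il := PySem.Str.lower issue
      if PySem.Str.isIn "missing" il && PySem.Str.isIn "url" il then
        acc ++ ["Add a valid URL for this bookmark"]
      else if PySem.Str.isIn "url" il && PySem.Str.isIn "title" il then
        acc ++ ["Check if URL and title fields are swapped"]
      else if PySem.Str.isIn "encoding" il then
        acc ++ ["Re-save the CSV file with UTF-8 encoding"]
      else if PySem.Str.isIn "truncated" il then
        acc ++ ["Check source data for complete content"]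
      else if PySem.Str.isIn "html" il then
        acc ++ ["Remove HTML tags from text fields"]
      else if PySem.Str.isIn "tags" il then
        acc ++ ["Format tags as comma-separated values"]
      else if PySem.Str.isIn "date" il then
        acc ++ ["Use ISO format (YYYY-MM-DDTHH:MM:SSZ) for dates"]
      else acc) acc = acc ++ (issues.map pvMr).filterMap id := by
  induction issues generalizing acc with
  | nil => simp
  | cons h t ih =>
    rw [List.foldl_cons, step_eq_pvMr, ih]
    cases hm : pvMr h <;> simp [hm]

theorem gen_eq (issues : List String) (record : List (String × String)) :
    generate_fix_suggestions issues record =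
      (if ((issues.map pvMr).filterMap id).isEmpty then
        ["Verify data integrity and format consistency"]
      else (issues.map pvMr).filterMap id) := by
  simp only [generate_fix_suggestions]
  rw [foldl_chain_eq_filterMap]
  simp

-- B's fused pass computes (pvSec issues, pvSec (matched suggestions)).
theorem fused_pass_eq (issues : List String) (a b : String) :
    issues.foldl (fun (st : String × String) issue =>
      let it := st.1 ++ "\n    - " ++ issue
      match pvSuggest (PySem.Str.lower issue) pvRules with
      | some s => (it, st.2 ++ "\n    - " ++ s)
      | none => (it, st.2)) (a, b)
    = (a ++ pvSec issues, b ++ pvSec ((issues.map pvMr).filterMap id)) := by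
  induction issues generalizing a b with
  | nil => simp [pvSec]
  | cons h t ih =>
    simp only [List.foldl_cons]
    cases hm : pvMr h with
    | none =>
      have hm' : pvSuggest (PySem.Str.lower h) pvRules = none := hm
      rw [hm', ih]
      simp [hm, pvSec_cons, String.append_assoc]
    | some s =>
      have hm' : pvSuggest (PySem.Str.lower h) pvRules = some s := hm
      rw [hm', ih]
      simp [hm, pvSec_cons, String.append_assoc]

theorem pv_empty_append (s : String) : "" ++ s = s := by
  rw [← String.toList_inj]; simp

theorem join_single (x : String) : PySem.Str.join "\n" [x] = x := by
  simp [PySem.Str.join, PySem.Chars.join, List.intercalate]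

-- assembling the report: join of A's line list = B's concatenated text
theorem assemble (P : List String) (first hdr : String) (issues L : List String)
    (hhdr : PySem.Str.join "\n" (first :: P) = hdr) :
    PySem.Str.join "\n" ((first :: P) ++ ["  Issues:"] ++ issues.map (fun i => "    - " ++ i)
        ++ ["  Suggestions:"] ++ L.map (fun s => "    - " ++ s))
      = hdr ++ "\n  Issues:" ++ pvSec issues ++ "\n  Suggestions:" ++ pvSec L := by
  rw [join_eq_gl] at hhdr
  rw [List.cons_append, List.cons_append, List.cons_append, List.cons_append]
  rw [join_eq_gl, pvGl_append, pvGl_append, pvGl_append, pvGl_append]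
  rw [← pvSec_eq_gl, ← pvSec_eq_gl, ← hhdr]
  have h1 : pvGl ["  Issues:"] = "\n  Issues:" := rfl
  have h2 : pvGl ["  Suggestions:"] = "\n  Suggestions:" := rfl
  rw [h1, h2]
  rw [← String.toList_inj]
  simp [String.toList_append]

theorem hdr_title (u sl sf : String) :
    PySem.Str.join "\n" ["  URL: " ++ u, "  Title: " ++ sl ++ sf]
      = "  URL: " ++ u ++ "\n  Title: " ++ sl ++ sf := by
  rw [join_cons_cons, join_single, ← String.toList_inj]
  simp [String.toList_append]

theorem hdr_row (r u : String) :
    PySem.Str.join "\n" ["Row " ++ r ++ ":", "  URL: " ++ u]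
      = "Row " ++ r ++ ":\n" ++ "  URL: " ++ u := by
  rw [join_cons_cons, join_single, ← String.toList_inj]
  simp [String.toList_append]

theorem hdr_row_title (r u sl sf : String) :
    PySem.Str.join "\n" ["Row " ++ r ++ ":", "  URL: " ++ u, "  Title: " ++ sl ++ sf]
      = "Row " ++ r ++ ":\n" ++ "  URL: " ++ u ++ "\n  Title: " ++ sl ++ sf := by
  rw [join_cons_cons, join_cons_cons, join_single, ← String.toList_inj]
  simp [String.toList_append]

-- ===== VERDICT (by name: the statement is the Claim_ definition above) =====
theorem create_error_report_spec : Claim_equal_create_error_report := by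
  intro issues record row_number _
  show _ = _
  simp only [create_error_report, create_error_report_alt, gen_eq, fused_pass_eq]
  rw [PySem.List.foldl_append_singleton_eq_map, PySem.List.foldl_append_singleton_eq_map]
  simp only [pv_empty_append]
  set S := (issues.map pvMr).filterMap id with hS
  have hsug : (if S.isEmpty then ["Verify data integrity and format consistency"] else S) ≠ [] := by
    by_cases h : S = [] <;> simp [h]
  rw [if_neg (by simpa [List.isEmpty_iff] using hsug)]
  have hsugtext : (if (pvSec S == "") = true then
        ("\n    - Verify data integrity and format consistency" : String) else pvSec S)
      = pvSec (if S.isEmpty then ["Verify data integrity and format consistency"] else S) := by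
    cases hc : S with
    | nil => rfl
    | cons x xs =>
      have hne := pvSec_ne_empty x xs
      simp [hne]
  rw [hsugtext]
  set L := (if S.isEmpty then ["Verify data integrity and format consistency"] else S) with hL
  cases row_number with
  | none =>
    cases hb : ((PySem.Dict.mk record).getD "title" "" == "") with
    | true =>
      exact assemble [] ("  URL: " ++ (PySem.Dict.mk record).getD "url" "N/A")
        ("  URL: " ++ (PySem.Dict.mk record).getD "url" "N/A") issues L (join_single _)
    | false =>
      exact assemble
        ["  Title: " ++ PySem.Str.slice ((PySem.Dict.mk record).getD "title" "") none (some 100) ++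
          (if 100 < PySem.Str.len ((PySem.Dict.mk record).getD "title" "") then "..." else "")]
        ("  URL: " ++ (PySem.Dict.mk record).getD "url" "N/A")
        ("  URL: " ++ (PySem.Dict.mk record).getD "url" "N/A" ++ "\n  Title: " ++
          PySem.Str.slice ((PySem.Dict.mk record).getD "title" "") none (some 100) ++
          (if 100 < PySem.Str.len ((PySem.Dict.mk record).getD "title" "") then "..." else ""))
        issues L (hdr_title _ _ _)
  | some n =>
    cases hn : (n == 0) with
    | true =>
      simp only [hn]
      cases hb : ((PySem.Dict.mk record).getD "title" "" == "") with
      | true =>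
        exact assemble [] ("  URL: " ++ (PySem.Dict.mk record).getD "url" "N/A")
          ("  URL: " ++ (PySem.Dict.mk record).getD "url" "N/A") issues L (join_single _)
      | false =>
        exact assemble
          ["  Title: " ++ PySem.Str.slice ((PySem.Dict.mk record).getD "title" "") none (some 100) ++
            (if 100 < PySem.Str.len ((PySem.Dict.mk record).getD "title" "") then "..." else "")]
          ("  URL: " ++ (PySem.Dict.mk record).getD "url" "N/A")
          ("  URL: " ++ (PySem.Dict.mk record).getD "url" "N/A" ++ "\n  Title: " ++
            PySem.Str.slice ((PySem.Dict.mk record).getD "title" "") none (some 100) ++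
            (if 100 < PySem.Str.len ((PySem.Dict.mk record).getD "title" "") then "..." else ""))
          issues L (hdr_title _ _ _)
    | false =>
      simp only [hn]
      cases hb : ((PySem.Dict.mk record).getD "title" "" == "") with
      | true =>
        exact assemble ["  URL: " ++ (PySem.Dict.mk record).getD "url" "N/A"]
          ("Row " ++ PySem.Int.toStr n ++ ":")
          ("Row " ++ PySem.Int.toStr n ++ ":\n" ++ "  URL: " ++ (PySem.Dict.mk record).getD "url" "N/A")
          issues L (hdr_row _ _)
      | false =>
        exact assemble
          ["  URL: " ++ (PySem.Dict.mk record).getD "url" "N/A",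
           "  Title: " ++ PySem.Str.slice ((PySem.Dict.mk record).getD "title" "") none (some 100) ++
            (if 100 < PySem.Str.len ((PySem.Dict.mk record).getD "title" "") then "..." else "")]
          ("Row " ++ PySem.Int.toStr n ++ ":")
          ("Row " ++ PySem.Int.toStr n ++ ":\n" ++ "  URL: " ++ (PySem.Dict.mk record).getD "url" "N/A"
            ++ "\n  Title: " ++
            PySem.Str.slice ((PySem.Dict.mk record).getD "title" "") none (some 100) ++
            (if 100 < PySem.Str.len ((PySem.Dict.mk record).getD "title" "") then "..." else ""))
          issues L (hdr_row_title _ _ _ _)
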